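-- pv_equiv track=rewrite | github.com/kumiko-oreyome/iir_hqa_server | preprocessing.py | remove_whilte_space
-- ===== SOURCE A (Python) =====
-- def remove_whilte_space(data):
--     if type(data) == str:
--         data = [data]
--     l = []
--     for s in data:
--         s = "".join(s.split())
--         l.append(s)
--     return l
-- ===== SOURCE B (Python) =====
-- def remove_whilte_space(data):
--     if type(data) == str:
--         data = [data]
--     return ["".join(c for c in s if not c.isspace()) for s in data]
-- ===== Notes on version B (the rewrite author's own statement) =====
-- stated objective: idiomatic
-- what changed: Replaces the explicit accumulator loop with split-on-whitespace-runs-and-rejoin per string by a single list comprehension doing a character-level filter that drops whitespace characters.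
import Mathlib
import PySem

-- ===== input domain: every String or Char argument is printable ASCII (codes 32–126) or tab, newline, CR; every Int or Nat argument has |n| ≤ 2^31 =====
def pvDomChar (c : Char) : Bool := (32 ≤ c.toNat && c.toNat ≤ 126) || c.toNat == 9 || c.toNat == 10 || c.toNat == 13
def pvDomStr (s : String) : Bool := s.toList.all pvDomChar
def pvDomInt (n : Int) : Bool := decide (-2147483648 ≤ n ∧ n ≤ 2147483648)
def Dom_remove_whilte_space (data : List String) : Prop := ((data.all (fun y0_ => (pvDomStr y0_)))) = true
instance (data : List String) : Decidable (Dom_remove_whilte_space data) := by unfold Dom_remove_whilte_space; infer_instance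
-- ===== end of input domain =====

-- B replaces A's split/rejoin accumulator loop by a per-string character filter (idiomatic; same cost; return value only).

-- ===== PORT A =====
-- A: l = []; for s in data: l.append("".join(s.split()))  (the 'type(data)==str' guard is vacuous for List String)
def remove_whilte_space (data : List String) : List String :=
  data.foldl (fun l s => l ++ [PySem.Str.join "" (PySem.Str.split₀ s)]) []

-- ===== PORT B =====
-- B: ["".join(c for c in s if not c.isspace()) for s in data]
def remove_whilte_space_alt (data : List String) : List String :=
  data.map (fun s => String.ofList (s.toList.filter (fun c => !PySem.Chars.isspace c)))

-- ===== PRECONDITION & SPEC =====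
def Spec_remove_whilte_space (data : List String) (out : List String) : Prop := out = remove_whilte_space_alt data
instance (data : List String) (out : List String) : Decidable (Spec_remove_whilte_space data out) := by unfold Spec_remove_whilte_space; infer_instance

-- ===== CLAIM (what is proved, stated in full; the proofs are below) =====
def Claim_equal_remove_whilte_space : Prop := ∀ (data : List String), Dom_remove_whilte_space data → Spec_remove_whilte_space data (remove_whilte_space data)

-- ===== LEMMAS AND PROOFS =====

-- split₀.go invariant: the concatenation of the produced pieces is the accumulated
-- state plus the non-whitespace characters of the remaining input.
theorem pv_go_flatten (s cur : List Char) (acc : List (List Char)) :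
    (PySem.Chars.split₀.go s cur acc).flatten
      = acc.reverse.flatten ++ cur.reverse ++ s.filter (fun c => !PySem.Chars.isspace c) := by
  induction s generalizing cur acc with
  | nil =>
    simp only [PySem.Chars.split₀.go]
    by_cases h : cur.isEmpty
    · simp_all [List.isEmpty_iff]
    · simp [h]
  | cons c rest ih =>
    simp only [PySem.Chars.split₀.go]
    by_cases hs : PySem.Chars.isspace c
    · by_cases h : cur.isEmpty
      · simp_all [List.isEmpty_iff]
      · simp [hs, h, ih]
    · simp [hs, ih]

theorem pv_flatten_intersperse_nil {α : Type} (l : List (List α)) :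
    (List.intersperse ([] : List α) l).flatten = l.flatten := by
  induction l with
  | nil => rfl
  | cons x rest ih =>
    cases rest with
    | nil => rfl
    | cons y t => simpa [List.intersperse] using ih

theorem pv_join_split (s : String) :
    PySem.Str.join "" (PySem.Str.split₀ s)
      = String.ofList (s.toList.filter (fun c => !PySem.Chars.isspace c)) := by
  simp only [PySem.Str.join, PySem.Str.split₀, PySem.Chars.join]
  rw [List.map_map]
  have : (String.toList ∘ String.ofList) = id := by
    funext l; simp
  rw [this, List.map_id]
  congr 1
  rw [List.intercalate, String.toList_empty, pv_flatten_intersperse_nil]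
  have h := pv_go_flatten s.toList [] []
  simpa [PySem.Chars.split₀] using h

theorem pv_foldl_map (f : String → String) (data : List String) (init : List String) :
    data.foldl (fun l s => l ++ [f s]) init = init ++ data.map f := by
  induction data generalizing init with
  | nil => simp
  | cons s rest ih => simp [ih]

-- ===== VERDICT (by name: the statement is the Claim_ definition above) =====
theorem remove_whilte_space_spec : Claim_equal_remove_whilte_space := by
  intro data _
  unfold Spec_remove_whilte_space remove_whilte_space remove_whilte_space_alt
  rw [pv_foldl_map]
  simp [pv_join_split]
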